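-- pv_equiv track=rewrite | github.com/Himashveta/csc597-courseproject | src/polyfuzz/coverage/c_branch_vars.py | _pow2_bucket
-- ===== SOURCE A (Python) =====
-- def _pow2_bucket(n: int) -> str:
--     if n <= 0:
--         return "0"
--     bits = 0
--     while n > 1:
--         n >>= 1
--         bits += 1
--     return f"2^{bits}"
-- ===== SOURCE B (Python) =====
-- def _pow2_bucket(n: int) -> str:
--     if n <= 0:
--         return "0"
--     return f"2^{n.bit_length() - 1}"
-- ===== Notes on version B (the rewrite author's own statement) =====
-- stated objective: faster
-- what changed: Replaces the right-shift counting loop with the closed-form exponent n.bit_length() - 1.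
import Mathlib
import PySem

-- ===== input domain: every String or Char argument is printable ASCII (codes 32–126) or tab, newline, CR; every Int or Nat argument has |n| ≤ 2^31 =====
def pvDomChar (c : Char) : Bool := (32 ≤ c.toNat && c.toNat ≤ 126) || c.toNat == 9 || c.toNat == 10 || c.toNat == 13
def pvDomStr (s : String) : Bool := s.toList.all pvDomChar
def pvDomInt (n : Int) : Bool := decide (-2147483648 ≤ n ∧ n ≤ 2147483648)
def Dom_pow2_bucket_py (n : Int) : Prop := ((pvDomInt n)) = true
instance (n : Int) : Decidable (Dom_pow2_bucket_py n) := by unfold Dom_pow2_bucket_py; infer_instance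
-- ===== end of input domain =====

-- B replaces A's right-shift counting loop with the closed-form exponent bit_length(n) - 1 (faster: O(1) vs O(log n)).

-- ===== PORT A =====
-- A's while loop: halve n, counting the halvings, until n ≤ 1.
def pow2_loop_py (n : Int) (bits : Int) : Int :=
  if 1 < n then pow2_loop_py (PySem.Int.floordiv n 2) (bits + 1) else bits
termination_by n.toNat
decreasing_by
  rename_i h
  rw [PySem.Int.floordiv_eq_ediv_of_pos (by omega)]
  omega

def pow2_bucket_py (n : Int) : String :=
  if n ≤ 0 then "0"
  else "2^" ++ PySem.Int.toStr (pow2_loop_py n 0)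

-- ===== PORT B =====
def pow2_bucket_py_alt (n : Int) : String :=
  if n ≤ 0 then "0"
  else "2^" ++ PySem.Int.toStr ((PySem.Int.bitLength n : Int) - 1)

-- ===== PRECONDITION & SPEC =====
def Spec_pow2_bucket_py (n : Int) (out : String) : Prop := out = pow2_bucket_py_alt n
instance (n : Int) (out : String) : Decidable (Spec_pow2_bucket_py n out) := by unfold Spec_pow2_bucket_py; infer_instance

-- ===== CLAIM (what is proved, stated in full; the proofs are below) =====
def Claim_equal_pow2_bucket_py : Prop := ∀ (n : Int), Dom_pow2_bucket_py n → Spec_pow2_bucket_py n (pow2_bucket_py n)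

-- ===== LEMMAS AND PROOFS =====

-- A's loop, run on positive n, yields bits + (bit_length n - 1).
theorem pow2_loop_eq (n : Int) (bits : Int) (hn : 0 < n) :
    pow2_loop_py n bits = bits + ((PySem.Int.bitLength n : Int) - 1) := by
  induction n, bits using pow2_loop_py.induct with
  | case1 n bits h ih =>
    have hhalf : 0 < PySem.Int.floordiv n 2 := by
      rw [PySem.Int.floordiv_eq_ediv_of_pos (by omega)]; omega
    have hbl := PySem.Int.bitLength_of_pos (n := n) (by omega)
    have hbl1 : 1 ≤ PySem.Int.bitLength (PySem.Int.floordiv n 2) := by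
      have h2 := PySem.Int.lt_two_pow_bitLength (n := PySem.Int.floordiv n 2)
      by_contra hc
      have hz : PySem.Int.bitLength (PySem.Int.floordiv n 2) = 0 := by omega
      rw [hz, pow_zero] at h2
      omega
    rw [pow2_loop_py, if_pos h, ih hhalf, hbl]
    push_cast
    omega
  | case2 n bits h =>
    have hn1 : n = 1 := by omega
    subst hn1
    rw [pow2_loop_py, if_neg h]
    have : PySem.Int.bitLength (1 : Int) = 1 := by decide
    rw [this]
    omega

-- ===== VERDICT (by name: the statement is the Claim_ definition above) =====
theorem pow2_bucket_py_spec : Claim_equal_pow2_bucket_py := by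
  intro n _
  unfold Spec_pow2_bucket_py pow2_bucket_py pow2_bucket_py_alt
  by_cases h : n ≤ 0
  · simp [h]
  · rw [if_neg h, if_neg h, pow2_loop_eq n 0 (by omega)]
    norm_num
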